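-- pv_equiv track=rewrite | github.com/RuanVitorr/atividades-de-Computabilidade-e-Complexidade-de-Algortimos | att06.py | afn_contem_zero
-- ===== SOURCE A (Python) =====
-- def afn_contem_zero(palavra):
--     estados = ['q0']  # Começa no estado q0
--
--     for char in palavra:
--         novos_estados = []
--         for estado in estados:
--             if estado == 'q0':
--                 if char == '0':
--                     novos_estados.append('q1')
--                 if char == '1':
--                     novos_estados.append('q0')
--             elif estado == 'q1':
--                 novos_estados.append('q1')
--         estados = novos_estados
--
--     if 'q1' in estados:
--         return "palavra aceita (contém pelo menos um '0')"
--     else: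
--         return "palavra rejeitada (não contém '0')"
-- ===== SOURCE B (Python) =====
-- def afn_contem_zero(palavra):
--     # Accepted iff the first character that is not '1' exists and is '0'.
--     for char in palavra:
--         if char == '1':
--             continue
--         if char == '0':
--             return "palavra aceita (contém pelo menos um '0')"
--         return "palavra rejeitada (não contém '0')"
--     return "palavra rejeitada (não contém '0')"
-- ===== Notes on version B (the rewrite author's own statement) =====
-- stated objective: simpler
-- what changed: Replaces the per-character NFA state-set rebuild with a direct early-terminating scan: accept as soon as a zero digit follows only one digits, reject on any other character or at end of word, maintaining no state container.
import Mathlib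
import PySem

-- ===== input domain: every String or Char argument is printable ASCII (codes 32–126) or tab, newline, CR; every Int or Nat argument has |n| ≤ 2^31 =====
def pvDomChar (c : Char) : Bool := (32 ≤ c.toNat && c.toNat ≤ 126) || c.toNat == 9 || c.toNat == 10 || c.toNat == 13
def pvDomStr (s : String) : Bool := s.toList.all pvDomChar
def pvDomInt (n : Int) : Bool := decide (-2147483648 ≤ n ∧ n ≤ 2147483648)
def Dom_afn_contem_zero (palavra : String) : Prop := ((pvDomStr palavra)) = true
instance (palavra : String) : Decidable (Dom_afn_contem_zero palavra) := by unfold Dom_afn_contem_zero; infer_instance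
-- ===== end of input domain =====

-- B replaces A's per-character NFA state-set rebuild by a direct early-terminating scan (simpler; same cost).

-- ===== PORT A =====
-- one step of A's outer loop: rebuild novos_estados from estados for one char
def pvStepA (estados : List String) (char : Char) : List String :=
  estados.foldl (fun novos estado =>
    if estado = "q0" then
      (novos ++ (if char = '0' then ["q1"] else [])) ++ (if char = '1' then ["q0"] else [])
    else if estado = "q1" then
      novos ++ ["q1"]
    else novos) []

def afn_contem_zero (palavra : String) : String :=
  let estados := palavra.toList.foldl pvStepA ["q0"]
  if "q1" ∈ estados then "palavra aceita (contém pelo menos um '0')"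
  else "palavra rejeitada (não contém '0')"

-- ===== PORT B =====
-- B's loop: continue on '1', accept on '0', reject otherwise; reject after the loop
def pvScanB : List Char → String
  | [] => "palavra rejeitada (não contém '0')"
  | c :: rest =>
    if c = '1' then pvScanB rest
    else if c = '0' then "palavra aceita (contém pelo menos um '0')"
    else "palavra rejeitada (não contém '0')"

def afn_contem_zero_alt (palavra : String) : String := pvScanB palavra.toList

-- ===== PRECONDITION & SPEC =====
def Spec_afn_contem_zero (palavra : String) (out : String) : Prop := out = afn_contem_zero_alt palavra
instance (palavra : String) (out : String) : Decidable (Spec_afn_contem_zero palavra out) := by unfold Spec_afn_contem_zero; infer_instance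

-- ===== CLAIM (what is proved, stated in full; the proofs are below) =====
def Claim_equal_afn_contem_zero : Prop := ∀ (palavra : String), Dom_afn_contem_zero palavra → Spec_afn_contem_zero palavra (afn_contem_zero palavra)

-- ===== LEMMAS AND PROOFS =====

theorem pvStepA_q1 (c : Char) : pvStepA ["q1"] c = ["q1"] := by
  simp [pvStepA]

theorem pvStepA_nil (c : Char) : pvStepA [] c = [] := by
  simp [pvStepA]

theorem foldl_q1 (l : List Char) : l.foldl pvStepA ["q1"] = ["q1"] := by
  induction l with
  | nil => rfl
  | cons c rest ih => simpa [List.foldl, pvStepA_q1] using ih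

theorem foldl_nil (l : List Char) : l.foldl pvStepA [] = [] := by
  induction l with
  | nil => rfl
  | cons c rest ih => simpa [List.foldl, pvStepA_nil] using ih

theorem main_lemma (l : List Char) :
    (if "q1" ∈ l.foldl pvStepA ["q0"] then "palavra aceita (contém pelo menos um '0')"
     else "palavra rejeitada (não contém '0')") = pvScanB l := by
  induction l with
  | nil => simp [pvScanB]
  | cons c rest ih =>
    by_cases h1 : c = '1'
    · subst h1
      have hstep : pvStepA ["q0"] '1' = ["q0"] := by decide
      simpa [List.foldl, hstep, pvScanB] using ih
    · by_cases h0 : c = '0'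
      · subst h0
        have hstep : pvStepA ["q0"] '0' = ["q1"] := by decide
        simp [List.foldl, hstep, foldl_q1, pvScanB]
      · have hstep : pvStepA ["q0"] c = [] := by
          simp [pvStepA, h0, h1]
        simp [List.foldl, hstep, foldl_nil, pvScanB, h0, h1]

-- ===== VERDICT (by name: the statement is the Claim_ definition above) =====
theorem afn_contem_zero_spec : Claim_equal_afn_contem_zero := by
  intro palavra _
  unfold Spec_afn_contem_zero afn_contem_zero afn_contem_zero_alt
  exact main_lemma palavra.toList
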